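-- pv_equiv track=rewrite | github.com/UTAHOGA/MIRROR | scripts/build-uoga-projected-bonus-draw-2026-simulated.py | build_opponent_pool_with_split
-- ===== SOURCE A (Python) =====
-- import math
--
-- def allocate_bonus_pool(pool_map: dict[int, int], permit_count: int, round_up_bonus: bool = False) -> tuple[int, int, dict[int, int]]:
--     reserved_bonus_pool = math.ceil(permit_count / 2) if round_up_bonus else math.floor(permit_count / 2)
--     random_pool = permit_count - reserved_bonus_pool
--     allocations: dict[int, int] = {}
--     remaining_bonus = reserved_bonus_pool
--
--     for point_level in range(32, -1, -1):
--         applicants = pool_map.get(point_level, 0)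
--         taken = min(applicants, remaining_bonus) if remaining_bonus > 0 else 0
--         allocations[point_level] = taken
--         remaining_bonus -= taken
--
--     return reserved_bonus_pool, random_pool, allocations
--
-- def build_focal_pool(
--     carryover_pool: dict[int, int],
--     apply_with_points: int,
--     current_permits: int,
-- ) -> dict[int, int]:
--     focal_pool = dict(carryover_pool)
--     focal_pool[apply_with_points] = focal_pool.get(apply_with_points, 0) + 1
--     return focal_pool
--
-- def build_opponent_pool_with_split(
--     carryover_pool: dict[int, int],
--     apply_with_points: int,
--     current_permits: int,
--     round_up_bonus: bool,
-- ) -> tuple[dict[int, int], int, int, dict[int, int]]: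
--     focal_pool = build_focal_pool(carryover_pool, apply_with_points, current_permits)
--     reserved_bonus_pool, random_pool, allocations = allocate_bonus_pool(focal_pool, current_permits, round_up_bonus)
--
--     opponents_by_point: dict[int, int] = {}
--     for point_level in range(32, -1, -1):
--         remaining = max(0, focal_pool.get(point_level, 0) - allocations.get(point_level, 0))
--         if point_level == apply_with_points:
--             remaining = max(0, remaining - 1)
--         opponents_by_point[point_level] = remaining
--
--     return opponents_by_point, reserved_bonus_pool, random_pool, allocations
-- ===== SOURCE B (Python) =====
-- def build_opponent_pool_with_split(
--     carryover_pool: dict[int, int],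
--     apply_with_points: int,
--     current_permits: int,
--     round_up_bonus: bool,
-- ) -> tuple[dict[int, int], int, int, dict[int, int]]:
--     reserved_bonus_pool = -((-current_permits) // 2) if round_up_bonus else current_permits // 2
--
--     def go(level: int, remaining: int) -> tuple[list[tuple[int, int]], list[tuple[int, int]]]:
--         if level < 0:
--             return [], []
--         bump = 1 if level == apply_with_points else 0
--         focal = carryover_pool.get(level, 0) + bump
--         taken = min(focal, remaining) if remaining > 0 else 0
--         alloc_rest, opp_rest = go(level - 1, remaining - taken)
--         return ([(level, taken)] + alloc_rest,
--                 [(level, max(0, focal - taken - bump))] + opp_rest)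
--
--     alloc_pairs, opp_pairs = go(32, reserved_bonus_pool)
--     return (dict(opp_pairs), reserved_bonus_pool,
--             current_permits - reserved_bonus_pool, dict(alloc_pairs))
-- ===== Notes on version B (the rewrite author's own statement) =====
-- stated objective: alternative
-- what changed: Replaced A's staged decomposition (copy the carryover dict into a focal dict, then one loop filling the allocations dict, then a second loop filling the opponents dict) by a single structural recursion over the level that threads the remaining bonus, computes each level's focal count arithmetically, returns both result sequences as pair lists built by cons, and converts them to dicts once at the end; the bonus reservation uses negated floor division -((-n)//2) for the ceiling instead of math.ceil on a float.
import Mathlib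
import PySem

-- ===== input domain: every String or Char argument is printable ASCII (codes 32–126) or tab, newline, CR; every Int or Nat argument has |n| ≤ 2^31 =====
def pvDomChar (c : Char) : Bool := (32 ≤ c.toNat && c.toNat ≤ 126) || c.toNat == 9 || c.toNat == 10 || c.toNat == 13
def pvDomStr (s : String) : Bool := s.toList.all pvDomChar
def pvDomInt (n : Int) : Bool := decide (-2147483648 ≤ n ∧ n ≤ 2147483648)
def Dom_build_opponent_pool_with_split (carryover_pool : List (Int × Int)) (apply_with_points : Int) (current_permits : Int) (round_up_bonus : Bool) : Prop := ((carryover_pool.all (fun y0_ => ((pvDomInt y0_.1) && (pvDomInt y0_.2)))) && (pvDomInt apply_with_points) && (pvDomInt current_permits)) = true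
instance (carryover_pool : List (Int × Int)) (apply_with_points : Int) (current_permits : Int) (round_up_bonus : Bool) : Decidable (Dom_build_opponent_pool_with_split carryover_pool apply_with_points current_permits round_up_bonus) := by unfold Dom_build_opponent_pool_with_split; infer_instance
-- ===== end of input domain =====

-- B replaces A's build-dicts-in-two-staged-loops decomposition by one structural recursion
-- over the levels that returns both pair lists, turned into dicts only at the end (objective: alternative).

-- ===== PORT A =====
def build_focal_pool (carryover_pool : List (Int × Int)) (apply_with_points : Int) (_current_permits : Int) : PySem.Dict Int Int :=
  let focal := PySem.Dict.mk carryover_pool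
  focal.insert apply_with_points (focal.getD apply_with_points 0 + 1)

def allocate_bonus_pool (pool_map : PySem.Dict Int Int) (permit_count : Int) (round_up_bonus : Bool) : Int × Int × PySem.Dict Int Int :=
  -- math.ceil(n/2) / math.floor(n/2): n/2 is an exact float for |n| ≤ 2^31, so they equal (n+1)//2 and n//2
  let reserved_bonus_pool := if round_up_bonus then PySem.Int.floordiv (permit_count + 1) 2 else PySem.Int.floordiv permit_count 2
  let random_pool := permit_count - reserved_bonus_pool
  let st := (PySem.List.pyRange 32 (-1) (-1)).foldl
    (fun (st : PySem.Dict Int Int × Int) point_level =>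
      let applicants := pool_map.getD point_level 0
      let taken := if st.2 > 0 then min applicants st.2 else 0
      (st.1.insert point_level taken, st.2 - taken))
    ((PySem.Dict.empty : PySem.Dict Int Int), reserved_bonus_pool)
  (reserved_bonus_pool, random_pool, st.1)

def build_opponent_pool_with_split (carryover_pool : List (Int × Int)) (apply_with_points : Int) (current_permits : Int) (round_up_bonus : Bool) : (List (Int × Int)) × Int × Int × (List (Int × Int)) :=
  let focal := build_focal_pool carryover_pool apply_with_points current_permits
  let rra := allocate_bonus_pool focal current_permits round_up_bonus
  let opp := (PySem.List.pyRange 32 (-1) (-1)).foldl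
    (fun (d : PySem.Dict Int Int) point_level =>
      let remaining := max 0 (focal.getD point_level 0 - rra.2.2.getD point_level 0)
      let remaining2 := if point_level == apply_with_points then max 0 (remaining - 1) else remaining
      d.insert point_level remaining2)
    (PySem.Dict.empty : PySem.Dict Int Int)
  (opp.items, rra.1, rra.2.1, rra.2.2.items)

-- ===== PORT B =====
-- recursion on the level; fuel n encodes level = n - 1, n = 0 is Python's `level < 0` base case
def pvGoB (carryd : PySem.Dict Int Int) (ap : Int) : Nat → Int → List (Int × Int) × List (Int × Int)
  | 0, _ => ([], [])
  | n+1, remaining =>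
    let level : Int := (n : Int)
    let bump : Int := if level == ap then 1 else 0
    let focal := carryd.getD level 0 + bump
    let taken := if remaining > 0 then min focal remaining else 0
    let rest := pvGoB carryd ap n (remaining - taken)
    ((level, taken) :: rest.1, (level, max 0 (focal - taken - bump)) :: rest.2)

def build_opponent_pool_with_split_alt (carryover_pool : List (Int × Int)) (apply_with_points : Int) (current_permits : Int) (round_up_bonus : Bool) : (List (Int × Int)) × Int × Int × (List (Int × Int)) :=
  -- -((-n) // 2) = math.ceil(n/2) exactly on |n| ≤ 2^31
  let reserved_bonus_pool := if round_up_bonus then -(PySem.Int.floordiv (-current_permits) 2) else PySem.Int.floordiv current_permits 2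
  let p := pvGoB (PySem.Dict.mk carryover_pool) apply_with_points 33 reserved_bonus_pool
  ((PySem.Dict.ofList p.2).items, reserved_bonus_pool, current_permits - reserved_bonus_pool, (PySem.Dict.ofList p.1).items)

-- ===== PRECONDITION & SPEC =====
def Spec_build_opponent_pool_with_split (carryover_pool : List (Int × Int)) (apply_with_points : Int) (current_permits : Int) (round_up_bonus : Bool) (out : (List (Int × Int)) × Int × Int × (List (Int × Int))) : Prop := out = build_opponent_pool_with_split_alt carryover_pool apply_with_points current_permits round_up_bonus
instance (carryover_pool : List (Int × Int)) (apply_with_points : Int) (current_permits : Int) (round_up_bonus : Bool) (out : (List (Int × Int)) × Int × Int × (List (Int × Int))) : Decidable (Spec_build_opponent_pool_with_split carryover_pool apply_with_points current_permits round_up_bonus out) := by unfold Spec_build_opponent_pool_with_split; infer_instance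

-- ===== CLAIM (what is proved, stated in full; the proofs are below) =====
def Claim_equal_build_opponent_pool_with_split : Prop := ∀ (carryover_pool : List (Int × Int)) (apply_with_points : Int) (current_permits : Int) (round_up_bonus : Bool), Dom_build_opponent_pool_with_split carryover_pool apply_with_points current_permits round_up_bonus → Spec_build_opponent_pool_with_split carryover_pool apply_with_points current_permits round_up_bonus (build_opponent_pool_with_split carryover_pool apply_with_points current_permits round_up_bonus)

-- ===== LEMMAS AND PROOFS =====

/-- `taken` for one level, given the focal count function and current remaining bonus. -/
def pvTaken (f : Int → Int) (l r : Int) : Int := if r > 0 then min (f l) r else 0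

/-- The `(level, taken)` pairs produced by the bonus-allocation loop. -/
def pvAllocPairs (f : Int → Int) : List Int → Int → List (Int × Int)
  | [], _ => []
  | l :: ls, r => (l, pvTaken f l r) :: pvAllocPairs f ls (r - pvTaken f l r)

/-- The `(level, opponents)` pairs produced over the same threaded remaining bonus. -/
def pvOppPairs (f : Int → Int) (ap : Int) : List Int → Int → List (Int × Int)
  | [], _ => []
  | l :: ls, r => (l, max 0 (f l - pvTaken f l r - (if l == ap then 1 else 0))) :: pvOppPairs f ap ls (r - pvTaken f l r)

def pvF (carry : List (Int × Int)) (ap : Int) : Int → Int :=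
  fun l => (PySem.Dict.mk carry).getD l 0 + (if l == ap then 1 else 0)

def pvRes (cur : Int) (ru : Bool) : Int :=
  if ru then PySem.Int.floordiv (cur + 1) 2 else PySem.Int.floordiv cur 2

def pvLevels : List Int := PySem.List.pyRange 32 (-1) (-1)

/-- The descending level list [n-1, …, 0]. -/
def pvDesc : Nat → List Int
  | 0 => []
  | n+1 => (n : Int) :: pvDesc n

lemma pvAllocPairs_fst (f : Int → Int) (L : List Int) : ∀ r, (pvAllocPairs f L r).map Prod.fst = L := by
  induction L with
  | nil => intro r; rfl
  | cons l ls ih => intro r; simp [pvAllocPairs, ih]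

lemma pvOppPairs_fst (f : Int → Int) (ap : Int) (L : List Int) : ∀ r, (pvOppPairs f ap L r).map Prod.fst = L := by
  induction L with
  | nil => intro r; rfl
  | cons l ls ih => intro r; simp [pvOppPairs, ih]

lemma pv_alloc_fold (pool : PySem.Dict Int Int) (f : Int → Int) (L : List Int) :
    ∀ (d : PySem.Dict Int Int) (r : Int),
    (∀ l ∈ L, pool.getD l 0 = f l) → (∀ l ∈ L, d.contains l = false) → L.Nodup →
    (L.foldl
      (fun (st : PySem.Dict Int Int × Int) point_level =>
        let applicants := pool.getD point_level 0
        let taken := if st.2 > 0 then min applicants st.2 else 0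
        (st.1.insert point_level taken, st.2 - taken)) (d, r)).1.items
      = d.items ++ pvAllocPairs f L r := by
  induction L with
  | nil => intro d r _ _ _; simp [pvAllocPairs]
  | cons l ls ih =>
      intro d r hf hd hnd
      have hfl := hf l (by simp)
      have hdl := hd l (by simp)
      have ht : (if r > 0 then min (pool.getD l 0) r else 0) = pvTaken f l r := by
        simp only [pvTaken]; rw [hfl]
      simp only [List.foldl_cons]
      simp only [ht]
      rw [ih (d.insert l (pvTaken f l r)) (r - pvTaken f l r)
            (fun x hx => hf x (by simp [hx]))
            (fun x hx => by
              rw [PySem.Dict.contains_insert]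
              have hne : x ≠ l := fun h => (List.nodup_cons.mp hnd).1 (h ▸ hx)
              simp [hne, hd x (by simp [hx])])
            (List.nodup_cons.mp hnd).2]
      rw [PySem.Dict.items_insert_of_not_contains _ _ hdl]
      simp [pvAllocPairs]

lemma pv_opp_fold (focalD allocD : PySem.Dict Int Int) (f : Int → Int) (ap : Int) (L : List Int) :
    ∀ (dE : PySem.Dict Int Int) (r : Int),
    (∀ l ∈ L, focalD.getD l 0 = f l) →
    (∀ p ∈ pvAllocPairs f L r, allocD.getD p.1 0 = p.2) →
    (∀ l ∈ L, dE.contains l = false) → L.Nodup →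
    (L.foldl
      (fun (d : PySem.Dict Int Int) point_level =>
        let remaining := max 0 (focalD.getD point_level 0 - allocD.getD point_level 0)
        let remaining2 := if point_level == ap then max 0 (remaining - 1) else remaining
        d.insert point_level remaining2) dE).items
      = dE.items ++ pvOppPairs f ap L r := by
  induction L with
  | nil => intro dE r _ _ _ _; simp [pvOppPairs]
  | cons l ls ih =>
      intro dE r hf ha hd hnd
      have hfl := hf l (by simp)
      have hdl := hd l (by simp)
      have hal : allocD.getD l 0 = pvTaken f l r :=
        ha (l, pvTaken f l r) (by simp [pvAllocPairs])
      have hv : (if l == ap then max 0 (max 0 (focalD.getD l 0 - allocD.getD l 0) - 1)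
                  else max 0 (focalD.getD l 0 - allocD.getD l 0))
            = max 0 (f l - pvTaken f l r - (if l == ap then 1 else 0)) := by
        rw [hfl, hal]
        by_cases h : l = ap
        · simp only [h, BEq.rfl, if_pos]; omega
        · simp only [beq_iff_eq, h, if_false]; omega
      simp only [List.foldl_cons]
      simp only [hv]
      rw [ih (dE.insert l (max 0 (f l - pvTaken f l r - (if l == ap then 1 else 0)))) (r - pvTaken f l r)
            (fun x hx => hf x (by simp [hx]))
            (fun p hp => ha p (by simp [pvAllocPairs, hp]))
            (fun x hx => by
              rw [PySem.Dict.contains_insert]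
              have hne : x ≠ l := fun h => (List.nodup_cons.mp hnd).1 (h ▸ hx)
              simp [hne, hd x (by simp [hx])])
            (List.nodup_cons.mp hnd).2]
      rw [PySem.Dict.items_insert_of_not_contains _ _ hdl]
      simp [pvOppPairs]

lemma pvLevels_nodup : pvLevels.Nodup := by decide

lemma pvRes_def (cur : Int) (ru : Bool) :
    (if ru then PySem.Int.floordiv (cur + 1) 2 else PySem.Int.floordiv cur 2) = pvRes cur ru := rfl

lemma pvLevels_def : PySem.List.pyRange 32 (-1) (-1) = pvLevels := rfl

lemma alloc_fst (pool : PySem.Dict Int Int) (pc : Int) (ru : Bool) :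
    (allocate_bonus_pool pool pc ru).1 = pvRes pc ru := by
  simp only [allocate_bonus_pool, pvRes_def]

lemma alloc_snd (pool : PySem.Dict Int Int) (pc : Int) (ru : Bool) :
    (allocate_bonus_pool pool pc ru).2.1 = pc - pvRes pc ru := by
  simp only [allocate_bonus_pool, pvRes_def]

lemma alloc_items (pool : PySem.Dict Int Int) (pc : Int) (ru : Bool) (f : Int → Int)
    (hf : ∀ l ∈ pvLevels, pool.getD l 0 = f l) :
    (allocate_bonus_pool pool pc ru).2.2.items = pvAllocPairs f pvLevels (pvRes pc ru) := by
  simp only [allocate_bonus_pool, pvRes_def, pvLevels_def]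
  exact (pv_alloc_fold pool f pvLevels PySem.Dict.empty (pvRes pc ru) hf
    (fun l _ => PySem.Dict.contains_empty l) pvLevels_nodup).trans (List.nil_append _)

set_option maxHeartbeats 1000000 in
lemma portA_eq (carryover_pool : List (Int × Int)) (apply_with_points : Int) (current_permits : Int) (round_up_bonus : Bool) :
    build_opponent_pool_with_split carryover_pool apply_with_points current_permits round_up_bonus
    = (pvOppPairs (pvF carryover_pool apply_with_points) apply_with_points pvLevels (pvRes current_permits round_up_bonus),
       pvRes current_permits round_up_bonus,
       current_permits - pvRes current_permits round_up_bonus,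
       pvAllocPairs (pvF carryover_pool apply_with_points) pvLevels (pvRes current_permits round_up_bonus)) := by
  have hf : ∀ l ∈ pvLevels,
      (build_focal_pool carryover_pool apply_with_points current_permits).getD l 0
        = pvF carryover_pool apply_with_points l := by
    intro l _
    simp only [build_focal_pool, pvF, PySem.Dict.getD_insert]
    by_cases h : l = apply_with_points <;> simp [h]
  have hitems := alloc_items (build_focal_pool carryover_pool apply_with_points current_permits)
      current_permits round_up_bonus (pvF carryover_pool apply_with_points) hf
  have ha : ∀ p ∈ pvAllocPairs (pvF carryover_pool apply_with_points) pvLevels (pvRes current_permits round_up_bonus),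
      ((allocate_bonus_pool (build_focal_pool carryover_pool apply_with_points current_permits)
          current_permits round_up_bonus).2.2).getD p.1 0 = p.2 := by
    intro p hp
    apply PySem.Dict.getD_of_mem_items
    · rw [hitems]; simpa using hp
    · simp only [PySem.Dict.keys, hitems]
      rw [pvAllocPairs_fst]
      exact pvLevels_nodup
  have hopp := (pv_opp_fold (build_focal_pool carryover_pool apply_with_points current_permits)
      ((allocate_bonus_pool (build_focal_pool carryover_pool apply_with_points current_permits)
          current_permits round_up_bonus).2.2)
      (pvF carryover_pool apply_with_points) apply_with_points pvLevels PySem.Dict.empty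
      (pvRes current_permits round_up_bonus)
      hf ha (fun l _ => PySem.Dict.contains_empty l) pvLevels_nodup).trans (List.nil_append _)
  simp only [build_opponent_pool_with_split, pvLevels_def]
  rw [Prod.mk.injEq]
  refine ⟨hopp, ?_⟩
  rw [Prod.mk.injEq]
  refine ⟨alloc_fst _ _ _, ?_⟩
  rw [Prod.mk.injEq]
  exact ⟨alloc_snd _ _ _, hitems⟩

-- ----- B side -----

lemma pvDesc_nodup : ∀ n : Nat, (pvDesc n).Nodup := by
  intro n
  induction n with
  | zero => simp [pvDesc]
  | succ m ih =>
      have hmem : ∀ k : Nat, ∀ x ∈ pvDesc k, x < (k : Int) := by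
        intro k
        induction k with
        | zero => simp [pvDesc]
        | succ j ihj =>
            intro x hx
            rcases List.mem_cons.mp hx with h | h
            · subst h; push_cast; omega
            · have := ihj x h; push_cast; omega
      exact List.nodup_cons.mpr ⟨fun h => by have := hmem m _ h; omega, ih⟩

lemma pvDesc_33 : pvDesc 33 = pvLevels := by decide

lemma pvGoB_eq (carryd : PySem.Dict Int Int) (ap : Int) (f : Int → Int)
    (hf : ∀ l : Int, carryd.getD l 0 + (if l == ap then 1 else 0) = f l) :
    ∀ (n : Nat) (r : Int),
    pvGoB carryd ap n r = (pvAllocPairs f (pvDesc n) r, pvOppPairs f ap (pvDesc n) r) := by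
  intro n
  induction n with
  | zero => intro r; rfl
  | succ m ih =>
      intro r
      have hfl := hf (m : Int)
      have ht : (if r > 0 then min (carryd.getD (m : Int) 0 + (if (m : Int) == ap then (1:Int) else 0)) r else 0)
            = pvTaken f (m : Int) r := by
        simp only [pvTaken]; rw [hfl]
      have hv : max 0 (carryd.getD (m : Int) 0 + (if (m : Int) == ap then (1:Int) else 0) - pvTaken f (m : Int) r - (if (m : Int) == ap then (1:Int) else 0))
            = max 0 (f (m : Int) - pvTaken f (m : Int) r - (if (m : Int) == ap then (1:Int) else 0)) := by
        rw [hfl]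
      simp only [pvGoB, ht, hv, ih]
      rfl

lemma items_ofList_nodup (l : List (Int × Int)) (h : (l.map Prod.fst).Nodup) :
    (PySem.Dict.ofList l).items = l := by
  have := PySem.Dict.items_foldl_insert_fresh l Prod.fst Prod.snd (PySem.Dict.empty : PySem.Dict Int Int)
      (fun a _ => PySem.Dict.contains_empty a.1) h
  simpa [PySem.Dict.ofList, PySem.Dict.update] using this

lemma ceil_div_two (n : Int) : -(PySem.Int.floordiv (-n) 2) = PySem.Int.floordiv (n + 1) 2 := by
  rw [PySem.Int.floordiv_eq_ediv_of_pos (by omega), PySem.Int.floordiv_eq_ediv_of_pos (by omega)]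
  omega

set_option maxHeartbeats 1000000 in
lemma portB_eq (carryover_pool : List (Int × Int)) (apply_with_points : Int) (current_permits : Int) (round_up_bonus : Bool) :
    build_opponent_pool_with_split_alt carryover_pool apply_with_points current_permits round_up_bonus
    = (pvOppPairs (pvF carryover_pool apply_with_points) apply_with_points pvLevels (pvRes current_permits round_up_bonus),
       pvRes current_permits round_up_bonus,
       current_permits - pvRes current_permits round_up_bonus,
       pvAllocPairs (pvF carryover_pool apply_with_points) pvLevels (pvRes current_permits round_up_bonus)) := by
  have hres : (if round_up_bonus then -(PySem.Int.floordiv (-current_permits) 2) else PySem.Int.floordiv current_permits 2)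
      = pvRes current_permits round_up_bonus := by
    simp only [pvRes, ceil_div_two]
  have hgo := pvGoB_eq (PySem.Dict.mk carryover_pool) apply_with_points
      (pvF carryover_pool apply_with_points) (fun l => rfl) 33 (pvRes current_permits round_up_bonus)
  have hnodA : ((pvAllocPairs (pvF carryover_pool apply_with_points) (pvDesc 33) (pvRes current_permits round_up_bonus)).map Prod.fst).Nodup := by
    rw [pvAllocPairs_fst]; exact pvDesc_nodup 33
  have hnodO : ((pvOppPairs (pvF carryover_pool apply_with_points) apply_with_points (pvDesc 33) (pvRes current_permits round_up_bonus)).map Prod.fst).Nodup := by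
    rw [pvOppPairs_fst]; exact pvDesc_nodup 33
  rw [pvDesc_33] at hgo hnodA hnodO
  simp only [build_opponent_pool_with_split_alt, hres, hgo]
  rw [items_ofList_nodup _ hnodA, items_ofList_nodup _ hnodO]

-- ===== VERDICT (by name: the statement is the Claim_ definition above) =====
theorem build_opponent_pool_with_split_spec : Claim_equal_build_opponent_pool_with_split := by
  intro carryover_pool apply_with_points current_permits round_up_bonus _
  unfold Spec_build_opponent_pool_with_split
  rw [portA_eq, portB_eq]
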